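-- pv_equiv track=rewrite | github.com/henhans/ed_2particle_test | fock_basis.py | generate_fock_basis
-- ===== SOURCE A (Python) =====
-- from itertools import combinations, product
--
-- OccupationState = tuple[int, ...]
--
-- def generate_fock_basis(num_orbitals: int, num_particles: int | None = None) -> list[OccupationState]:
--     """Generate a Fock basis for ``num_orbitals`` spinless orbitals.
--
--     Args:
--         num_orbitals: Number of available orbitals.
--         num_particles: Optional fixed particle-number sector. If ``None``,
--             all sectors are returned.
--
--     Returns:
--         A list of occupation-number tuples.
--
--     Raises:
--         ValueError: If inputs are invalid.
--     """
--
--     if num_orbitals < 0: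
--         raise ValueError("num_orbitals must be non-negative")
--
--     if num_particles is None:
--         return [tuple(state) for state in product((0, 1), repeat=num_orbitals)]
--
--     if num_particles < 0:
--         raise ValueError("num_particles must be non-negative")
--     if num_particles > num_orbitals:
--         raise ValueError("num_particles cannot exceed num_orbitals")
--
--     basis: list[OccupationState] = []
--     for occupied in combinations(range(num_orbitals), num_particles):
--         state = [0] * num_orbitals
--         for idx in occupied:
--             state[idx] = 1
--         basis.append(tuple(state))
--
--     return basis
-- ===== SOURCE B (Python) =====
-- def generate_fock_basis(num_orbitals, num_particles=None):
--     """Explicit-stack backtracking: build each occupation tuple position by position."""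
--     if num_orbitals < 0:
--         raise ValueError("num_orbitals must be non-negative")
--
--     if num_particles is None:
--         states = [()]
--         for _ in range(num_orbitals):
--             states = [(0,) + t for t in states] + [(1,) + t for t in states]
--         return states
--
--     if num_particles < 0:
--         raise ValueError("num_particles must be non-negative")
--     if num_particles > num_orbitals:
--         raise ValueError("num_particles cannot exceed num_orbitals")
--
--     basis = []
--     stack = [((), num_orbitals, num_particles)]
--     while stack:
--         prefix, left, rem = stack.pop()
--         if rem == 0:
--             basis.append(prefix + (0,) * left)
--         elif rem == left:
--             basis.append(prefix + (1,) * rem)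
--         else:
--             # push the 0-branch first so the 1-branch is explored first
--             stack.append((prefix + (0,), left - 1, rem))
--             stack.append((prefix + (1,), left - 1, rem - 1))
--     return basis
-- ===== Notes on version B (the rewrite author's own statement) =====
-- stated objective: alternative
-- what changed: Replaces itertools.product/combinations plus index-scatter state building with an explicit-stack backtracking enumeration that builds each occupation tuple position by position (1-branch explored before the 0-branch, with bulk completion once rem is 0 or equals the remaining positions), and an iterative doubling loop for the all-sectors case; same values in the same order.
import Mathlib
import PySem

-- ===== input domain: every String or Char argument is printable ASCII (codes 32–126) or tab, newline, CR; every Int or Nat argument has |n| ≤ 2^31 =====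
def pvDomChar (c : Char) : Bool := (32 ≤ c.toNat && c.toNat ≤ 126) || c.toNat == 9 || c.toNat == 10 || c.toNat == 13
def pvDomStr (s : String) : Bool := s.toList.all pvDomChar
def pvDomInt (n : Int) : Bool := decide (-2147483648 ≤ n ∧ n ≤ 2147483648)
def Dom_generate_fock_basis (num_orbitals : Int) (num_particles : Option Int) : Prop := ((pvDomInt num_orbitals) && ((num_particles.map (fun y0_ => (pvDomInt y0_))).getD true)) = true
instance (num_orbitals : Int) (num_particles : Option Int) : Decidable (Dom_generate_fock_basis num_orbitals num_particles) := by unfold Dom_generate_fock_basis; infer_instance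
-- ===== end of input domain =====

-- B replaces the itertools.product/combinations enumeration by a recursive backtracking
-- generator building each tuple position by position; same values, same order ("alternative").

-- ===== PORT A =====
-- itertools.combinations(l, k) in Python's lexicographic order (l a list of distinct values)
def combosA : List Nat → Nat → List (List Nat)
  | _, 0 => [[]]
  | [], _ + 1 => []
  | x :: xs, k + 1 => (combosA xs k).map (fun occ => x :: occ) ++ combosA xs (k + 1)

-- state = [0]*n; for idx in occupied: state[idx] = 1   (idx is always in range here)
def stateA (n : Nat) (occ : List Nat) : List Int :=
  occ.foldl (fun st idx => st.set idx 1) (List.replicate n 0)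

-- itertools.product((0,1), repeat=n): ascending, leftmost slot varies slowest
def prodA (n : Nat) : List (List Int) :=
  (List.range n).foldl (fun acc _ => acc.flatMap (fun t => [t ++ [0], t ++ [1]])) [[]]

def generate_fock_basis (num_orbitals : Int) (num_particles : Option Int) : List (List Int) :=
  if num_orbitals < 0 then []        -- ValueError (outside Pre_)
  else
    match num_particles with
    | none => prodA num_orbitals.toNat
    | some k =>
        if k < 0 then []             -- ValueError (outside Pre_)
        else if num_orbitals < k then []  -- ValueError (outside Pre_)
        else (combosA (List.range num_orbitals.toNat) k.toNat).foldl
               (fun b occ => b ++ [stateA num_orbitals.toNat occ]) []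

-- ===== PORT B =====
-- all-sectors case: iterative doubling, 0-branch before 1-branch
def bitsIter (n : Nat) : List (List Int) :=
  (List.range n).foldl (fun st _ => st.map (fun t => 0 :: t) ++ st.map (fun t => 1 :: t)) [[]]

-- fixed sector: explicit-stack DFS; each frame (prefix, left, rem); the 1-branch is
-- pushed on top so it is explored first; rem = 0 / rem = left complete in bulk
def dfsB : List (List Int × Nat × Nat) → List (List Int) → List (List Int)
  | [], basis => basis
  | (pfx, left, rem) :: rest, basis =>
      if rem = 0 then dfsB rest (basis ++ [pfx ++ List.replicate left 0])
      else if rem = left then dfsB rest (basis ++ [pfx ++ List.replicate rem 1])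
      else if hl : left = 0 then dfsB rest basis  -- unreachable from valid start frames; totalizes the measure
      else dfsB ((pfx ++ [1], left - 1, rem - 1) :: (pfx ++ [0], left - 1, rem) :: rest) basis
termination_by stack _ => (stack.map (fun f => 3 ^ f.2.1)).sum
decreasing_by
  all_goals simp only [List.map_cons, List.sum_cons]
  · have h1 : 1 ≤ 3 ^ left := Nat.one_le_pow left 3 (by norm_num)
    omega
  · have h1 : 1 ≤ 3 ^ left := Nat.one_le_pow left 3 (by norm_num)
    omega
  · have h1 : 1 ≤ 3 ^ left := Nat.one_le_pow left 3 (by norm_num)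
    omega
  · have hl2 : 0 < left := Nat.pos_of_ne_zero hl
    have h3 : left = (left - 1) + 1 := by omega
    have h2 : 3 ^ left = 3 ^ (left - 1) * 3 := by
      conv_lhs => rw [h3]
      rw [Nat.pow_succ]
    have h1 : 1 ≤ 3 ^ (left - 1) := Nat.one_le_pow (left - 1) 3 (by norm_num)
    omega

def generate_fock_basis_alt (num_orbitals : Int) (num_particles : Option Int) : List (List Int) :=
  if num_orbitals < 0 then []
  else
    match num_particles with
    | none => bitsIter num_orbitals.toNat
    | some k =>
        if k < 0 then []
        else if num_orbitals < k then []
        else dfsB [([], num_orbitals.toNat, k.toNat)] []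

-- ===== PRECONDITION & SPEC =====
-- Pre_ excludes exactly the inputs on which A raises ValueError:
-- negative num_orbitals, negative num_particles, or num_particles > num_orbitals.
def Pre_generate_fock_basis (num_orbitals : Int) (num_particles : Option Int) : Prop :=
  0 ≤ num_orbitals ∧
  (num_particles.all (fun k => decide (0 ≤ k ∧ k ≤ num_orbitals))) = true

instance (num_orbitals : Int) (num_particles : Option Int) : Decidable (Pre_generate_fock_basis num_orbitals num_particles) := by
  unfold Pre_generate_fock_basis; infer_instance

def pvWitness_generate_fock_basis : Int × Option Int := (3, some 2)

def Spec_generate_fock_basis (num_orbitals : Int) (num_particles : Option Int) (out : List (List Int)) : Prop := out = generate_fock_basis_alt num_orbitals num_particles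
instance (num_orbitals : Int) (num_particles : Option Int) (out : List (List Int)) : Decidable (Spec_generate_fock_basis num_orbitals num_particles out) := by unfold Spec_generate_fock_basis; infer_instance

-- ===== CLAIM (what is proved, stated in full; the proofs are below) =====
def Claim_equal_generate_fock_basis : Prop := ∀ (num_orbitals : Int) (num_particles : Option Int), Dom_generate_fock_basis num_orbitals num_particles → Pre_generate_fock_basis num_orbitals num_particles → Spec_generate_fock_basis num_orbitals num_particles (generate_fock_basis num_orbitals num_particles)

-- ===== LEMMAS AND PROOFS =====

-- proof-side recursive characterisations of B's two loops
def bitsB : Nat → List (List Int)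
  | 0 => [[]]
  | n + 1 =>
      (bitsB n).map (fun t => 0 :: t) ++ (bitsB n).map (fun t => 1 :: t)

def goB : Nat → Nat → List (List Int)
  | 0, rem => if rem = 0 then [[]] else []
  | left + 1, rem =>
      (if 0 < rem then (goB left (rem - 1)).map (fun t => 1 :: t) else []) ++
      (if rem ≤ left then (goB left rem).map (fun t => 0 :: t) else [])

theorem bitsIter_eq_bitsB : ∀ n : Nat, bitsIter n = bitsB n := by
  intro n
  induction n with
  | zero => rfl
  | succ m ih =>
      unfold bitsIter
      rw [List.range_succ, List.foldl_append]
      show (bitsIter m).map _ ++ (bitsIter m).map _ = _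
      rw [ih]
      rfl

theorem goB_zero : ∀ l : Nat, goB l 0 = [List.replicate l 0] := by
  intro l
  induction l with
  | zero => rfl
  | succ m ih => simp [goB, ih, List.replicate_succ]

theorem goB_self : ∀ l : Nat, goB l l = [List.replicate l 1] := by
  intro l
  induction l with
  | zero => rfl
  | succ m ih => simp [goB, ih, List.replicate_succ]

theorem dfs_spec : ∀ (l : Nat), ∀ (r : Nat), r ≤ l → ∀ (pfx : List Int) rest basis,
    dfsB ((pfx, l, r) :: rest) basis
      = dfsB rest (basis ++ (goB l r).map (fun t => pfx ++ t)) := by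
  intro l
  induction l using Nat.strong_induction_on with
  | _ l ih =>
    intro r hr pfx rest basis
    by_cases hr0 : r = 0
    · subst hr0
      rw [show dfsB ((pfx, l, 0) :: rest) basis
            = dfsB rest (basis ++ [pfx ++ List.replicate l 0]) from by rw [dfsB.eq_def]; simp]
      rw [goB_zero]
      simp
    · by_cases hrl : r = l
      · subst hrl
        rw [show dfsB ((pfx, r, r) :: rest) basis
              = dfsB rest (basis ++ [pfx ++ List.replicate r 1]) from by rw [dfsB.eq_def]; simp [hr0]]
        rw [goB_self]
        simp
      · obtain ⟨l', rfl⟩ : ∃ l', l = l' + 1 := by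
          cases l with
          | zero => omega
          | succ l' => exact ⟨l', rfl⟩
        rw [show dfsB ((pfx, l' + 1, r) :: rest) basis
              = dfsB ((pfx ++ [1], l', r - 1) :: (pfx ++ [0], l', r) :: rest) basis from by
            rw [dfsB.eq_def]
            simp [hr0, hrl]]
        rw [ih l' (by omega) (r - 1) (by omega),
            ih l' (by omega) r (by omega)]
        congr 1
        rw [show goB (l' + 1) r
              = (goB l' (r - 1)).map (fun t => 1 :: t) ++ (goB l' r).map (fun t => 0 :: t) from by
            simp [goB, Nat.pos_of_ne_zero hr0, show r ≤ l' by omega]]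
        simp [List.map_map, Function.comp_def, List.append_assoc]


-- A's append-accumulating loop is a map
theorem foldl_append_singleton {α β : Type} (f : α → β) :
    ∀ (l : List α) (acc : List β), l.foldl (fun b o => b ++ [f o]) acc = acc ++ l.map f := by
  intro l
  induction l with
  | nil => simp
  | cons x xs ih => intro acc; simp [List.foldl_cons, ih]

-- bitsB also satisfies the back-extension recursion of prodA
theorem flatMap_map_cons (c : Int) (L : List (List Int)) :
    (L.map (fun t => c :: t)).flatMap (fun t => [t ++ [0], t ++ [1]])
      = (L.flatMap (fun t => [t ++ [0], t ++ [1]])).map (fun t => c :: t) := by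
  induction L with
  | nil => rfl
  | cons h t ih => simp [ih]

theorem bitsB_flatMap (n : Nat) :
    bitsB (n + 1) = (bitsB n).flatMap (fun t => [t ++ [0], t ++ [1]]) := by
  induction n with
  | zero => decide
  | succ m ih =>
      conv_rhs => rw [show bitsB (m + 1)
        = (bitsB m).map (fun t => 0 :: t) ++ (bitsB m).map (fun t => 1 :: t) from rfl]
      rw [List.flatMap_append, flatMap_map_cons, flatMap_map_cons, ← ih]
      rfl

theorem prodA_eq_bitsB : ∀ n : Nat, prodA n = bitsB n := by
  intro n
  induction n with
  | zero => rfl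
  | succ m ih =>
      unfold prodA
      rw [List.range_succ, List.foldl_append]
      show (prodA m).flatMap _ = _
      rw [ih, bitsB_flatMap]

theorem setfold_getElem? : ∀ (occ : List Nat) (st : List Int) (i : Nat),
    (occ.foldl (fun s x => s.set x 1) st)[i]?
      = st[i]?.map (fun v => if occ.contains i then 1 else v) := by
  intro occ
  induction occ with
  | nil =>
      intro st i
      cases h : st[i]? <;> simp [h]
  | cons x xs ih =>
      intro st i
      rw [List.foldl_cons, ih (st.set x 1) i]
      by_cases hx : x = i
      · subst hx
        rw [List.getElem?_set_self']
        by_cases hlen : x < st.length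
        · rw [List.getElem?_eq_getElem hlen]
          simp
        · rw [List.getElem?_eq_none (show st.length ≤ x by omega)]
          simp
      · rw [List.getElem?_set_ne hx]
        cases h : st[i]? <;> simp [Ne.symm hx]

-- stateA is the membership indicator over range n
theorem stateA_eq (n : Nat) (occ : List Nat) :
    stateA n occ = (List.range n).map (fun i => if occ.contains i then (1 : Int) else 0) := by
  apply List.ext_getElem?
  intro i
  rw [stateA, setfold_getElem? occ (List.replicate n 0) i, List.getElem?_map]
  by_cases hi : i < n
  · rw [List.getElem?_eq_getElem (by simpa using hi),
        List.getElem?_eq_getElem (by simpa using hi)]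
    simp
  · rw [List.getElem?_eq_none (show (List.replicate n (0:Int)).length ≤ i by simpa using hi),
        List.getElem?_eq_none (show (List.range n).length ≤ i by simpa using hi)]
    rfl

theorem combos_mem_subset : ∀ (l : List Nat) (k : Nat) (occ : List Nat),
    occ ∈ combosA l k → ∀ x ∈ occ, x ∈ l := by
  intro l
  induction l with
  | nil =>
      intro k occ hocc x hx
      cases k with
      | zero => simp [combosA] at hocc; subst hocc; simp at hx
      | succ k => simp [combosA] at hocc
  | cons y ys ih =>
      intro k occ hocc x hx
      cases k with
      | zero => simp [combosA] at hocc; subst hocc; simp at hx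
      | succ k =>
          simp only [combosA, List.mem_append, List.mem_map] at hocc
          rcases hocc with ⟨occ', h1, h2⟩ | h
          · subst h2
            rcases List.mem_cons.mp hx with rfl | hx'
            · exact List.mem_cons_self
            · exact List.mem_cons_of_mem _ (ih k occ' h1 x hx')
          · exact List.mem_cons_of_mem _ (ih (k + 1) occ h x hx)

theorem combos_nil_of_lt : ∀ (l : List Nat) (k : Nat), l.length < k → combosA l k = [] := by
  intro l
  induction l with
  | nil =>
      intro k hk
      cases k with
      | zero => omega
      | succ k => rfl
  | cons y ys ih =>
      intro k hk
      cases k with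
      | zero => simp at hk
      | succ k =>
          simp only [combosA]
          rw [ih k (by simpa using hk), ih (k + 1) (by simp at hk ⊢; omega)]
          simp

-- main bridge: indicator images of A's combinations, in order, are exactly B's recursion
theorem mapstate_eq : ∀ (l : List Nat), l.Nodup → ∀ (k : Nat),
    (combosA l k).map (fun occ => l.map (fun i => if occ.contains i then (1 : Int) else 0))
      = goB l.length k := by
  intro l
  induction l with
  | nil =>
      intro _ k
      cases k with
      | zero => simp [combosA, goB]
      | succ k => simp [combosA, goB]
  | cons x xs ih =>
      intro hnd k
      have hx : x ∉ xs := (List.nodup_cons.mp hnd).1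
      have hnd' : xs.Nodup := (List.nodup_cons.mp hnd).2
      cases k with
      | zero =>
          have h0 := ih hnd' 0
          rw [show goB (x :: xs).length 0 = (goB xs.length 0).map (fun t => 0 :: t) by
                simp [goB], ← h0]
          simp [combosA]
      | succ k =>
          simp only [combosA, List.map_append, List.map_map]
          have hblock1 :
              (combosA xs k).map ((fun occ => (x :: xs).map (fun i => if occ.contains i then (1 : Int) else 0)) ∘ (fun occ => x :: occ))
                = ((combosA xs k).map (fun occ => xs.map (fun i => if occ.contains i then (1 : Int) else 0))).map (fun t => 1 :: t) := by
            rw [List.map_map]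
            apply List.map_congr_left
            intro occ _
            simp only [Function.comp, List.map_cons]
            congr 1
            · simp
            · apply List.map_congr_left
              intro i hi
              have : i ≠ x := fun h => hx (h ▸ hi)
              simp [this]
          have hblock2 :
              (combosA xs (k + 1)).map (fun occ => (x :: xs).map (fun i => if occ.contains i then (1 : Int) else 0))
                = ((combosA xs (k + 1)).map (fun occ => xs.map (fun i => if occ.contains i then (1 : Int) else 0))).map (fun t => 0 :: t) := by
            rw [List.map_map]
            apply List.map_congr_left
            intro occ hocc
            have hxo : x ∉ occ := fun hmem =>
              hx (combos_mem_subset xs (k + 1) occ hocc x hmem)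
            simp [Function.comp, List.contains_eq_mem, hxo]
          rw [hblock1, hblock2, ih hnd' k, ih hnd' (k + 1)]
          show _ = goB (xs.length + 1) (k + 1)
          simp only [goB, Nat.succ_sub_one, if_pos (Nat.succ_pos k)]
          congr 1
          by_cases hk : k + 1 ≤ xs.length
          · rw [if_pos hk]
          · rw [if_neg hk]
            rw [← ih hnd' (k + 1), combos_nil_of_lt xs (k + 1) (by omega)]
            simp

-- ===== VERDICT (by name: the statement is the Claim_ definition above) =====
theorem generate_fock_basis_spec : Claim_equal_generate_fock_basis := by
  intro n p _ hpre
  obtain ⟨hn, hp⟩ := hpre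
  have hnn : ¬ n < 0 := by omega
  unfold Spec_generate_fock_basis
  cases p with
  | none =>
      simp only [generate_fock_basis, generate_fock_basis_alt, if_neg hnn]
      rw [bitsIter_eq_bitsB]
      exact prodA_eq_bitsB n.toNat
  | some k =>
      simp only [Option.all_some, decide_eq_true_eq] at hp
      have hk0 : ¬ k < 0 := by omega
      have hkn : ¬ n < k := by omega
      simp only [generate_fock_basis, generate_fock_basis_alt, if_neg hnn, if_neg hk0,
        if_neg hkn]
      rw [foldl_append_singleton, List.nil_append,
          dfs_spec n.toNat k.toNat (by omega) [] [] []]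
      rw [show dfsB [] ([] ++ (goB n.toNat k.toNat).map (fun t => [] ++ t))
            = goB n.toNat k.toNat from by rw [dfsB.eq_def]; simp]
      have : (combosA (List.range n.toNat) k.toNat).map (stateA n.toNat)
          = (combosA (List.range n.toNat) k.toNat).map
              (fun occ => (List.range n.toNat).map (fun i => if occ.contains i then (1 : Int) else 0)) := by
        apply List.map_congr_left
        intro occ _
        exact stateA_eq n.toNat occ
      rw [this, mapstate_eq (List.range n.toNat) (List.nodup_range) k.toNat, List.length_range]
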